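-- pv_equiv track=rewrite | github.com/akoshochrein/hackerrank | algorithms/implementation/making-anagrams.py | _count_disjunct_letters_to_remove
-- ===== SOURCE A (Python) =====
-- def _count_disjunct_letters_to_remove(letter_frequency_first, letter_frequency_second):
--     first_letters = set(letter_frequency_first.keys())
--     second_letters = set(letter_frequency_second.keys())
--     disjunct_letters = first_letters.symmetric_difference(second_letters)
--
--     remove_counter = 0
--     for letter in disjunct_letters:
--         if letter in first_letters:
--             remove_counter += letter_frequency_first[letter]
--         else:
--             remove_counter += letter_frequency_second[letter]
--
--     return remove_counter
-- ===== SOURCE B (Python) =====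
-- def _count_disjunct_letters_to_remove(letter_frequency_first, letter_frequency_second):
--     # Inclusion-exclusion: total mass of both dicts, minus both counts of every shared letter.
--     total = sum(letter_frequency_first.values()) + sum(letter_frequency_second.values())
--     for letter, frequency in letter_frequency_first.items():
--         if letter in letter_frequency_second:
--             total -= frequency + letter_frequency_second[letter]
--     return total
-- ===== Notes on version B (the rewrite author's own statement) =====
-- stated objective: alternative
-- what changed: Replaces A's symmetric-difference set scan by inclusion-exclusion: B sums ALL frequencies of both dicts and then subtracts both counts of every shared letter, so no set is built and keys unique to the second dict are never visited.
import Mathlib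
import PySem

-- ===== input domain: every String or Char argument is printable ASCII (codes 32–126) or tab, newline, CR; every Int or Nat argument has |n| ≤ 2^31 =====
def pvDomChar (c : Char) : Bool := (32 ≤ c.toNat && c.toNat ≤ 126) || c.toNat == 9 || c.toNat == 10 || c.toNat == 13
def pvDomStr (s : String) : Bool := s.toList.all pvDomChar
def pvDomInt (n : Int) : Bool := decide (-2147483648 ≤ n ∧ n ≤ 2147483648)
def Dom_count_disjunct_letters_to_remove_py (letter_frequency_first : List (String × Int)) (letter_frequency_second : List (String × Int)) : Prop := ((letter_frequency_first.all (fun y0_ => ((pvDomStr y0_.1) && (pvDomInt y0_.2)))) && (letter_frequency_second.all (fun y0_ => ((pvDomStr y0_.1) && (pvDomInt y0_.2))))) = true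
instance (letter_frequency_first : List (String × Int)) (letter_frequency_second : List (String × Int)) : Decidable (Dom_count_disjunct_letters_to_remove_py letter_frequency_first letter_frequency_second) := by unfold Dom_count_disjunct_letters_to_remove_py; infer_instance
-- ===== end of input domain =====

-- B replaces A's symmetric-difference scan by inclusion-exclusion: sum all frequencies of
-- both dicts, then subtract both counts of every shared letter. Return value only.

-- ===== PORT A =====
def count_disjunct_letters_to_remove_py (letter_frequency_first : List (String × Int)) (letter_frequency_second : List (String × Int)) : Int :=
  let first_letters : PySem.Set String :=
    PySem.Set.ofList (PySem.Dict.keys (PySem.Dict.mk letter_frequency_first))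
  let second_letters : PySem.Set String :=
    PySem.Set.ofList (PySem.Dict.keys (PySem.Dict.mk letter_frequency_second))
  let disjunct_letters := PySem.Set.symmDiff first_letters second_letters
  -- sum over a set: the result does not depend on Python's iteration order
  disjunct_letters.foldl (fun remove_counter letter =>
    if PySem.Set.contains first_letters letter then
      remove_counter + PySem.Dict.getD (PySem.Dict.mk letter_frequency_first) letter 0
    else
      remove_counter + PySem.Dict.getD (PySem.Dict.mk letter_frequency_second) letter 0) 0

-- ===== PORT B =====
def count_disjunct_letters_to_remove_py_alt (letter_frequency_first : List (String × Int)) (letter_frequency_second : List (String × Int)) : Int :=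
  let total := (PySem.Dict.values (PySem.Dict.mk letter_frequency_first)).sum
    + (PySem.Dict.values (PySem.Dict.mk letter_frequency_second)).sum
  (PySem.Dict.mk letter_frequency_first).items.foldl (fun total kv =>
    if PySem.Dict.contains (PySem.Dict.mk letter_frequency_second) kv.1 then
      total - (kv.2 + PySem.Dict.getD (PySem.Dict.mk letter_frequency_second) kv.1 0)
    else total) total

-- ===== PRECONDITION & SPEC =====
-- Pre_ excludes association lists with duplicate keys: those do not represent any Python
-- dict (both programs take dicts, whose keys are unique by construction).
def Pre_count_disjunct_letters_to_remove_py (letter_frequency_first : List (String × Int)) (letter_frequency_second : List (String × Int)) : Prop :=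
  (letter_frequency_first.map Prod.fst).Nodup ∧ (letter_frequency_second.map Prod.fst).Nodup
instance (letter_frequency_first : List (String × Int)) (letter_frequency_second : List (String × Int)) : Decidable (Pre_count_disjunct_letters_to_remove_py letter_frequency_first letter_frequency_second) := by unfold Pre_count_disjunct_letters_to_remove_py; infer_instance

def pvWitness_count_disjunct_letters_to_remove_py : (List (String × Int)) × (List (String × Int)) :=
  ([("a", 1), ("b", 2)], [("b", 3), ("c", 4)])

def Spec_count_disjunct_letters_to_remove_py (letter_frequency_first : List (String × Int)) (letter_frequency_second : List (String × Int)) (out : Int) : Prop := out = count_disjunct_letters_to_remove_py_alt letter_frequency_first letter_frequency_second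
instance (letter_frequency_first : List (String × Int)) (letter_frequency_second : List (String × Int)) (out : Int) : Decidable (Spec_count_disjunct_letters_to_remove_py letter_frequency_first letter_frequency_second out) := by unfold Spec_count_disjunct_letters_to_remove_py; infer_instance

-- ===== CLAIM (what is proved, stated in full; the proofs are below) =====
def Claim_equal_count_disjunct_letters_to_remove_py : Prop := ∀ (letter_frequency_first : List (String × Int)) (letter_frequency_second : List (String × Int)), Dom_count_disjunct_letters_to_remove_py letter_frequency_first letter_frequency_second → Pre_count_disjunct_letters_to_remove_py letter_frequency_first letter_frequency_second → Spec_count_disjunct_letters_to_remove_py letter_frequency_first letter_frequency_second (count_disjunct_letters_to_remove_py letter_frequency_first letter_frequency_second)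

-- ===== LEMMAS AND PROOFS =====

-- a filtered sum and its complement make the whole sum
theorem sum_map_filter_split (l : List String) (p : String → Bool) (f : String → Int) :
    ((l.filter p).map f).sum + ((l.filter (fun x => !p x)).map f).sum = (l.map f).sum := by
  induction l with
  | nil => rfl
  | cons x t ih =>
    by_cases hp : p x
    · rw [List.filter_cons_of_pos hp, List.filter_cons_of_neg (by simp [hp])]
      simp only [List.map_cons, List.sum_cons]
      omega
    · rw [List.filter_cons_of_neg hp, List.filter_cons_of_pos (by simp [hp])]
      simp only [List.map_cons, List.sum_cons]
      omega

-- B's loop shape: conditionally subtracting is the start value minus the filtered sum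
theorem foldl_if_sub (l : List (String × Int)) (c : String × Int → Bool)
    (f : String × Int → Int) (b : Int) :
    l.foldl (fun t kv => if c kv then t - f kv else t) b
      = b - ((l.filter c).map f).sum := by
  induction l generalizing b with
  | nil => simp
  | cons kv t ih =>
    by_cases hc : c kv
    · rw [List.foldl_cons, if_pos hc, ih, List.filter_cons_of_pos hc]
      simp; omega
    · rw [List.foldl_cons, if_neg hc, ih, List.filter_cons_of_neg hc]

theorem count_eq (l1 l2 : List (String × Int))
    (h1 : (l1.map Prod.fst).Nodup) (h2 : (l2.map Prod.fst).Nodup) :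
    count_disjunct_letters_to_remove_py l1 l2 = count_disjunct_letters_to_remove_py_alt l1 l2 := by
  unfold count_disjunct_letters_to_remove_py count_disjunct_letters_to_remove_py_alt
  have hk1 : PySem.Dict.keys (PySem.Dict.mk l1) = l1.map Prod.fst := by
    simp [PySem.Dict.keys]
  have hk2 : PySem.Dict.keys (PySem.Dict.mk l2) = l2.map Prod.fst := by
    simp [PySem.Dict.keys]
  simp only [hk1, hk2, PySem.Set.ofList_eq_self_of_nodup _ h1, PySem.Set.ofList_eq_self_of_nodup _ h2]
  rw [show PySem.Set.symmDiff (l1.map Prod.fst) (l2.map Prod.fst)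
        = PySem.Set.diff (l1.map Prod.fst) (l2.map Prod.fst)
          ++ PySem.Set.diff (l2.map Prod.fst) (l1.map Prod.fst) from rfl]
  have hd : ∀ (s t : List String), PySem.Set.diff s t = s.filter (fun x => !PySem.Set.contains t x) := by
    intro s t; simp [PySem.Set.diff]
  rw [hd, hd, List.foldl_append]
  set g1 : String → Int := fun k => PySem.Dict.getD (PySem.Dict.mk l1) k 0 with hg1
  set g2 : String → Int := fun k => PySem.Dict.getD (PySem.Dict.mk l2) k 0 with hg2
  -- first segment of A: every letter is in first_letters
  have hseg1 : ∀ (b : Int),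
      ((l1.map Prod.fst).filter (fun x => !PySem.Set.contains (l2.map Prod.fst) x)).foldl
          (fun acc letter => if PySem.Set.contains (l1.map Prod.fst) letter then
              acc + g1 letter else acc + g2 letter) b
        = b + (((l1.map Prod.fst).filter (fun x => !PySem.Set.contains (l2.map Prod.fst) x)).map g1).sum := by
    intro b
    rw [PySem.List.foldl_congr_mem _ _ (fun acc k => acc + g1 k) _ ?_]
    · exact PySem.List.foldl_add _ g1 b
    · intro acc x hx
      have hx1 : x ∈ l1.map Prod.fst := List.mem_of_mem_filter hx
      have : PySem.Set.contains (l1.map Prod.fst) x = true := by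
        simp [PySem.Set.contains, hx1]
      rw [this, if_pos rfl]
  -- second segment of A: every letter was filtered out of first_letters
  have hseg2 : ∀ (b : Int),
      ((l2.map Prod.fst).filter (fun x => !PySem.Set.contains (l1.map Prod.fst) x)).foldl
          (fun acc letter => if PySem.Set.contains (l1.map Prod.fst) letter then
              acc + g1 letter else acc + g2 letter) b
        = b + (((l2.map Prod.fst).filter (fun x => !PySem.Set.contains (l1.map Prod.fst) x)).map g2).sum := by
    intro b
    rw [PySem.List.foldl_congr_mem _ _ (fun acc k => acc + g2 k) _ ?_]
    · exact PySem.List.foldl_add _ g2 b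
    · intro acc x hx
      have hx1 : PySem.Set.contains (l1.map Prod.fst) x = false := by
        have := List.of_mem_filter hx
        simpa using this
      rw [hx1]
      simp
  rw [hseg1, hseg2]
  -- B's loop via foldl_if_sub
  rw [foldl_if_sub l1 (fun kv => PySem.Dict.contains (PySem.Dict.mk l2) kv.1)
        (fun kv => kv.2 + g2 kv.1)]
  -- normalise B's membership test to Set.contains
  have hcont : ∀ kv : String × Int, PySem.Dict.contains (PySem.Dict.mk l2) kv.1
      = PySem.Set.contains (l2.map Prod.fst) kv.1 := by
    intro kv
    rw [PySem.Dict.contains_eq_decide_mem_keys]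
    simp [PySem.Dict.keys, PySem.Set.contains]
  rw [List.filter_congr (fun kv _ => hcont kv)]
  -- values are the key-indexed lookups
  have hv1 : PySem.Dict.values (PySem.Dict.mk l1) = (l1.map Prod.fst).map g1 := by
    have := PySem.Dict.values_eq_map_keys (PySem.Dict.mk l1) (by rw [hk1]; exact h1) 0
    rwa [hk1] at this
  have hv2 : PySem.Dict.values (PySem.Dict.mk l2) = (l2.map Prod.fst).map g2 := by
    have := PySem.Dict.values_eq_map_keys (PySem.Dict.mk l2) (by rw [hk2]; exact h2) 0
    rwa [hk2] at this
  rw [hv1, hv2]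
  -- reshape B's subtracted term into key-indexed sums over K1 ∩ K2
  set F := l1.filter (fun kv => PySem.Set.contains (l2.map Prod.fst) kv.1) with hF
  have hmapF : F.map (fun kv => kv.2 + g2 kv.1)
      = (F.map Prod.fst).map (fun k => g1 k + g2 k) := by
    rw [List.map_map]
    apply List.map_congr_left
    intro kv hkv
    have hmem : kv ∈ l1 := List.mem_of_mem_filter hkv
    have : g1 kv.1 = kv.2 := by
      apply PySem.Dict.getD_of_mem_items (PySem.Dict.mk l1)
      · exact hmem
      · rw [hk1]; exact h1
    simp [Function.comp, this]
  have hFfst : F.map Prod.fst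
      = (l1.map Prod.fst).filter (fun k => PySem.Set.contains (l2.map Prod.fst) k) := by
    rw [hF, List.filter_map]
    rfl
  rw [hmapF, hFfst, PySem.List.sum_map_add_int]
  -- the shared keys, enumerated from l1, are a permutation of those enumerated from l2
  have hperm : ((l1.map Prod.fst).filter (fun k => PySem.Set.contains (l2.map Prod.fst) k)).Perm
      ((l2.map Prod.fst).filter (fun k => PySem.Set.contains (l1.map Prod.fst) k)) := by
    rw [List.perm_ext_iff_of_nodup (h1.filter _) (h2.filter _)]
    intro a
    simp only [List.mem_filter]
    simp [PySem.Set.contains, and_comm]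
  have hpermsum : (((l1.map Prod.fst).filter (fun k => PySem.Set.contains (l2.map Prod.fst) k)).map g2).sum
      = (((l2.map Prod.fst).filter (fun k => PySem.Set.contains (l1.map Prod.fst) k)).map g2).sum :=
    (hperm.map g2).sum_eq
  rw [hpermsum]
  -- split each total by membership in the other key set and finish arithmetically
  have hsplit1 := sum_map_filter_split (l1.map Prod.fst)
    (fun k => PySem.Set.contains (l2.map Prod.fst) k) g1
  have hsplit2 := sum_map_filter_split (l2.map Prod.fst)
    (fun k => PySem.Set.contains (l1.map Prod.fst) k) g2
  omega

-- ===== VERDICT (by name: the statement is the Claim_ definition above) =====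
theorem count_disjunct_letters_to_remove_py_spec : Claim_equal_count_disjunct_letters_to_remove_py := by
  intro l1 l2 _ hpre
  unfold Spec_count_disjunct_letters_to_remove_py
  exact count_eq l1 l2 hpre.1 hpre.2
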